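-- pv_equiv track=rewrite | github.com/TIRIAS/SCNU_Capstone | build_i3d_from_nia.py | gen_non_overlap_intervals
-- ===== SOURCE A (Python) =====
-- def clamp(a, lo, hi):
--     return max(lo, min(hi, a))
--
-- def gen_non_overlap_intervals(total_f, pos_intervals, guard=0):
--     # pos_intervals: [(s,e), ...]
--     # guard: 이벤트 경계 전후 보호프레임
--     mask = [0]*(total_f+1)
--     for s,e in pos_intervals:
--         s = clamp(s-guard, 0, total_f)
--         e = clamp(e+guard, 0, total_f)
--         for i in range(s, e+1):
--             mask[i] = 1
--     # 연속 0 구간을 음성 후보로 나열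
--     neg = []
--     i = 0
--     while i <= total_f:
--         if mask[i] == 0:
--             j = i
--             while j <= total_f and mask[j] == 0:
--                 j += 1
--             neg.append((i, j-1))
--             i = j
--         else:
--             i += 1
--     return neg
-- ===== SOURCE B (Python) =====
-- def gen_non_overlap_intervals(total_f, pos_intervals, guard=0):
--     # Sort+merge sweep: clamp/expand each interval, sort, emit gaps directly
--     # (no per-frame mask).
--     ivs = []
--     for s, e in pos_intervals:
--         s2 = min(max(s - guard, 0), total_f)
--         e2 = min(max(e + guard, 0), total_f)
--         if s2 <= e2:
--             ivs.append((s2, e2))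
--     ivs.sort()
--     neg = []
--     cur = 0
--     for s2, e2 in ivs:
--         if s2 > cur:
--             neg.append((cur, s2 - 1))
--         cur = max(cur, e2 + 1)
--     if cur <= total_f:
--         neg.append((cur, total_f))
--     return neg
-- ===== Notes on version B (the rewrite author's own statement) =====
-- stated objective: faster
-- what changed: B replaces A's per-frame 0/1 mask (allocate total_f+1 cells, mark every frame of every expanded interval, then scan for zero-runs) by clamping each interval once, sorting, and a single merge-sweep over the sorted intervals that emits the complement gaps directly.
import Mathlib
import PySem

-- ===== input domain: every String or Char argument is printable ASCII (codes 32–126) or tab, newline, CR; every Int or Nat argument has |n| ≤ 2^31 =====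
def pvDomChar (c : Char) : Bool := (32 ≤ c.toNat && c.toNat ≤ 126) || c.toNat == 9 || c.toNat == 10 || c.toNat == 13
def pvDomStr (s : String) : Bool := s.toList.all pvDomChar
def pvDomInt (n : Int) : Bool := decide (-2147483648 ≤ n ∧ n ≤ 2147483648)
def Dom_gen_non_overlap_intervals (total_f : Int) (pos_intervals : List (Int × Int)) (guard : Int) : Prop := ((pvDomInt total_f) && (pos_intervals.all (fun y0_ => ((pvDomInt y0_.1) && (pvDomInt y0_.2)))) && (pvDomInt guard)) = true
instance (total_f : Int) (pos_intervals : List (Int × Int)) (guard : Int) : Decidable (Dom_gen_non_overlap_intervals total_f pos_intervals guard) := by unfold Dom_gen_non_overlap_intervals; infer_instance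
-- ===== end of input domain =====

-- B replaces A's per-frame mask (build a 0/1 array over all frames, then scan it for
-- zero-runs) by a sort-and-sweep over the clamped intervals that emits the gaps directly.

-- ===== PORT A =====
def pvClamp (a lo hi : Int) : Int := max lo (min hi a)

-- for i in range(s, e+1): mask[i] = 1
def pvMark (m : List Int) (s e : Int) : List Int :=
  (PySem.List.pyRange s (e + 1)).foldl (fun m i => m.set i.toNat 1) m

def pvBuildMask (total_f : Int) (pos_intervals : List (Int × Int)) (guard : Int) : List Int :=
  pos_intervals.foldl
    (fun m p => pvMark m (pvClamp (p.1 - guard) 0 total_f) (pvClamp (p.2 + guard) 0 total_f))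
    (List.replicate (total_f + 1).toNat 0)

-- inner 'while j <= total_f and mask[j] == 0: j += 1'
def pvFindJ (mask : List Int) (total_f j : Int) : Int :=
  if j ≤ total_f ∧ mask.getD j.toNat 0 == 0 then pvFindJ mask total_f (j + 1) else j
termination_by (total_f + 1 - j).toNat
decreasing_by omega

-- port of pvFindJ's progress, needed by pvScan's termination
theorem pvFindJ_ge (mask : List Int) (total_f : Int) : ∀ j, j ≤ pvFindJ mask total_f j := by
  intro j
  induction j using pvFindJ.induct mask total_f with
  | case1 j hc ih => rw [pvFindJ, if_pos hc]; omega
  | case2 j hc => rw [pvFindJ, if_neg hc]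

theorem pvFindJ_gt (mask : List Int) (total_f j : Int)
    (hc : j ≤ total_f ∧ (mask.getD j.toNat 0 == 0) = true) : j < pvFindJ mask total_f j := by
  rw [pvFindJ, if_pos hc]
  have := pvFindJ_ge mask total_f (j + 1); omega

-- outer 'while i <= total_f: …'
def pvScan (mask : List Int) (total_f i : Int) : List (Int × Int) :=
  if h : i ≤ total_f then
    if hm : mask.getD i.toNat 0 == 0 then
      (i, pvFindJ mask total_f i - 1) :: pvScan mask total_f (pvFindJ mask total_f i)
    else pvScan mask total_f (i + 1)
  else []
termination_by (total_f + 1 - i).toNat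
decreasing_by
  · have := pvFindJ_gt mask total_f i ⟨h, hm⟩; omega
  · omega

def gen_non_overlap_intervals (total_f : Int) (pos_intervals : List (Int × Int)) (guard : Int) : List (Int × Int) :=
  pvScan (pvBuildMask total_f pos_intervals guard) total_f 0

-- ===== PORT B =====
def pvStep (st : List (Int × Int) × Int) (p : Int × Int) : List (Int × Int) × Int :=
  ((if st.2 < p.1 then st.1 ++ [(st.2, p.1 - 1)] else st.1), max st.2 (p.2 + 1))

def gen_non_overlap_intervals_alt (total_f : Int) (pos_intervals : List (Int × Int)) (guard : Int) : List (Int × Int) :=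
  let ivs := pos_intervals.foldl (fun acc p =>
      let s2 := min (max (p.1 - guard) 0) total_f
      let e2 := min (max (p.2 + guard) 0) total_f
      if s2 ≤ e2 then acc ++ [(s2, e2)] else acc) []
  let svs := PySem.List.sorted2 ivs (fun p => p.1) (fun p => p.2)
  let r := svs.foldl pvStep ([], 0)
  if r.2 ≤ total_f then r.1 ++ [(r.2, total_f)] else r.1

-- ===== PRECONDITION & SPEC =====
-- Pre_ excludes exactly the inputs where A raises IndexError: total_f < 0 with a
-- non-empty interval list (the mask is empty but clamping still produces index 0).
def Pre_gen_non_overlap_intervals (total_f : Int) (pos_intervals : List (Int × Int)) (guard : Int) : Prop :=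
  0 ≤ total_f ∨ pos_intervals = []
instance (total_f : Int) (pos_intervals : List (Int × Int)) (guard : Int) : Decidable (Pre_gen_non_overlap_intervals total_f pos_intervals guard) := by unfold Pre_gen_non_overlap_intervals; infer_instance
def pvWitness_gen_non_overlap_intervals : Int × (List (Int × Int)) × Int := (5, [(1, 2)], 0)

def Spec_gen_non_overlap_intervals (total_f : Int) (pos_intervals : List (Int × Int)) (guard : Int) (out : List (Int × Int)) : Prop := out = gen_non_overlap_intervals_alt total_f pos_intervals guard
instance (total_f : Int) (pos_intervals : List (Int × Int)) (guard : Int) (out : List (Int × Int)) : Decidable (Spec_gen_non_overlap_intervals total_f pos_intervals guard out) := by unfold Spec_gen_non_overlap_intervals; infer_instance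

-- ===== CLAIM (what is proved, stated in full; the proofs are below) =====
def Claim_equal_gen_non_overlap_intervals : Prop := ∀ (total_f : Int) (pos_intervals : List (Int × Int)) (guard : Int), Dom_gen_non_overlap_intervals total_f pos_intervals guard → Pre_gen_non_overlap_intervals total_f pos_intervals guard → Spec_gen_non_overlap_intervals total_f pos_intervals guard (gen_non_overlap_intervals total_f pos_intervals guard)

-- ===== LEMMAS AND PROOFS =====

-- 'frame k is covered by some interval of l'
def pvCov (l : List (Int × Int)) (k : Int) : Bool := l.any (fun p => decide (p.1 ≤ k ∧ k ≤ p.2))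

-- reference scan over a coverage predicate (same shape as pvScan, mask replaced by f)
def pvFindC (T : Int) (f : Int → Bool) (j : Int) : Int :=
  if j ≤ T ∧ ¬ f j then pvFindC T f (j + 1) else j
termination_by (T + 1 - j).toNat
decreasing_by omega

theorem pvFindC_ge (T : Int) (f : Int → Bool) : ∀ j, j ≤ pvFindC T f j := by
  intro j
  induction j using pvFindC.induct T f with
  | case1 j hc ih => rw [pvFindC, if_pos hc]; omega
  | case2 j hc => rw [pvFindC, if_neg hc]

theorem pvFindC_gt (T : Int) (f : Int → Bool) (j : Int)
    (hc : j ≤ T ∧ ¬ f j = true) : j < pvFindC T f j := by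
  rw [pvFindC, if_pos hc]
  have := pvFindC_ge T f (j + 1); omega

def pvScanC (T : Int) (f : Int → Bool) (i : Int) : List (Int × Int) :=
  if h : i ≤ T then
    if hm : ¬ f i then
      (i, pvFindC T f i - 1) :: pvScanC T f (pvFindC T f i)
    else pvScanC T f (i + 1)
  else []
termination_by (T + 1 - i).toNat
decreasing_by
  · have := pvFindC_gt T f i ⟨h, hm⟩; omega
  · omega

theorem pvScanC_stop (T : Int) (f : Int → Bool) (i : Int) (h : ¬ i ≤ T) :
    pvScanC T f i = [] := by rw [pvScanC]; simp [h]

-- mask ↔ predicate bridges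
theorem pvFindJ_eq_findC (mask : List Int) (T : Int) (f : Int → Bool)
    (H : ∀ k : Int, 0 ≤ k → k ≤ T → (mask.getD k.toNat 0 == 0) = ! f k) :
    ∀ j, 0 ≤ j → pvFindJ mask T j = pvFindC T f j := by
  have key : ∀ k, 0 ≤ k → k ≤ T → ((mask.getD k.toNat 0 == 0) = true ↔ f k = false) := by
    intro k h1 h2; rw [H k h1 h2]; cases f k <;> simp
  intro j
  induction j using pvFindJ.induct mask T with
  | case1 j hc ih =>
    intro hj
    have hcc : j ≤ T ∧ ¬ f j = true := by
      refine ⟨hc.1, ?_⟩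
      have := (key j hj hc.1).mp hc.2
      simp [this]
    rw [pvFindJ, pvFindC, if_pos hc, if_pos hcc]
    exact ih (by omega)
  | case2 j hc =>
    intro hj
    rw [pvFindJ, pvFindC, if_neg hc, if_neg ?_]
    intro hcc
    exact hc ⟨hcc.1, (key j hj hcc.1).mpr (by simpa using hcc.2)⟩

theorem pvScan_eq_scanC (mask : List Int) (T : Int) (f : Int → Bool)
    (H : ∀ k : Int, 0 ≤ k → k ≤ T → (mask.getD k.toNat 0 == 0) = ! f k) :
    ∀ i, 0 ≤ i → pvScan mask T i = pvScanC T f i := by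
  have key : ∀ k, 0 ≤ k → k ≤ T → ((mask.getD k.toNat 0 == 0) = true ↔ f k = false) := by
    intro k h1 h2; rw [H k h1 h2]; cases f k <;> simp
  intro i
  induction i using pvScan.induct mask T with
  | case1 i hT hm ih =>
    intro hi
    have hf : ¬ f i = true := by have := (key i hi hT).mp hm; simp [this]
    rw [pvScan, pvScanC, dif_pos hT, dif_pos hT, dif_pos hm, dif_pos hf]
    rw [ih (le_trans hi (pvFindJ_ge mask T i)),
        pvFindJ_eq_findC mask T f H i hi]
  | case2 i hT hm ih =>
    intro hi
    have hf : ¬ ¬ f i = true := by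
      intro h
      exact hm ((key i hi hT).mpr (by simpa using h))
    rw [pvScan, pvScanC, dif_pos hT, dif_pos hT, dif_neg hm, dif_neg hf]
    exact ih (by omega)
  | case3 i hT =>
    intro _
    rw [pvScan, pvScanC, dif_neg hT, dif_neg hT]

-- findC characterisations
theorem pvFindC_eq (T : Int) (f : Int → Bool) :
    ∀ i s, i ≤ s → s ≤ T → (∀ k, i ≤ k → k < s → f k = false) → f s = true →
      pvFindC T f i = s := by
  intro i s
  induction i using pvFindC.induct T f with
  | case1 i hc ih =>
    intro his hsT hlow hfs
    rcases eq_or_lt_of_le his with h | h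
    · subst h; exact absurd hfs (by simpa using hc.2)
    · rw [pvFindC, if_pos hc]
      exact ih (by omega) hsT (fun k hk1 hk2 => hlow k (by omega) hk2) hfs
  | case2 i hc =>
    intro his hsT hlow hfs
    rcases eq_or_lt_of_le his with h | h
    · rw [pvFindC, if_neg hc]; omega
    · exfalso
      have hfi : f i = false := hlow i (le_refl i) h
      exact hc ⟨by omega, by simp [hfi]⟩

theorem pvFindC_top (T : Int) (f : Int → Bool) :
    ∀ i, i ≤ T → (∀ k, i ≤ k → k ≤ T → f k = false) → pvFindC T f i = T + 1 := by
  intro i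
  induction i using pvFindC.induct T f with
  | case1 i hc ih =>
    intro hiT hall
    rw [pvFindC, if_pos hc]
    by_cases h2 : i + 1 ≤ T
    · exact ih h2 (fun k hk1 hk2 => hall k (by omega) hk2)
    · rw [pvFindC, if_neg (by omega)]; omega
  | case2 i hc =>
    intro hiT hall
    exact absurd ⟨hiT, by simp [hall i (le_refl i) hiT]⟩ hc

-- scan over an all-covered prefix can be skipped
theorem pvScanC_skip (T : Int) (f : Int → Bool) :
    ∀ i m, i ≤ m → (∀ k, i ≤ k → k < m → f k = true) → pvScanC T f i = pvScanC T f m := by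
  intro i m him hall
  induction hn : (m - i).toNat generalizing i with
  | zero =>
    have : i = m := by omega
    rw [this]
  | succ n ih =>
    have hlt : i < m := by omega
    by_cases hiT : i ≤ T
    · have hfi : ¬ ¬ f i = true := by simp [hall i (le_refl i) hlt]
      rw [pvScanC, dif_pos hiT, dif_neg hfi]
      exact ih (i + 1) (by omega) (fun k hk1 hk2 => hall k (by omega) hk2) (by omega)
    · rw [pvScanC_stop T f i hiT, pvScanC_stop T f m (by omega)]

theorem pvFindC_congr (T : Int) (f g : Int → Bool) :
    ∀ i, (∀ k, i ≤ k → k ≤ T → f k = g k) → pvFindC T f i = pvFindC T g i := by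
  intro i
  induction i using pvFindC.induct T f with
  | case1 i hc ih =>
    intro H
    have hg : i ≤ T ∧ ¬ g i = true := ⟨hc.1, (H i (le_refl i) hc.1) ▸ hc.2⟩
    conv_lhs => rw [pvFindC]
    conv_rhs => rw [pvFindC]
    rw [if_pos hc, if_pos hg]
    exact ih (fun k hk1 hk2 => H k (by omega) hk2)
  | case2 i hc =>
    intro H
    conv_lhs => rw [pvFindC]
    conv_rhs => rw [pvFindC]
    rw [if_neg hc, if_neg ?_]
    intro hg
    exact hc ⟨hg.1, (H i (le_refl i) hg.1) ▸ hg.2⟩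

theorem pvScanC_congr (T : Int) (f g : Int → Bool) :
    ∀ i, (∀ k, i ≤ k → k ≤ T → f k = g k) → pvScanC T f i = pvScanC T g i := by
  intro i
  induction i using pvScanC.induct T f with
  | case1 i hT hm ih =>
    intro H
    have hg : ¬ g i = true := (H i (le_refl i) hT) ▸ hm
    conv_lhs => rw [pvScanC]
    conv_rhs => rw [pvScanC]
    rw [dif_pos hT, dif_pos hT, dif_pos hm, dif_pos hg]
    rw [ih (fun k hk1 hk2 => H k (le_trans (pvFindC_ge T f i) hk1) hk2)]
    rw [pvFindC_congr T f g i (fun k hk1 hk2 => H k hk1 hk2)]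
  | case2 i hT hm ih =>
    intro H
    have hg : ¬ ¬ g i = true := (H i (le_refl i) hT) ▸ hm
    conv_lhs => rw [pvScanC]
    conv_rhs => rw [pvScanC]
    rw [dif_pos hT, dif_pos hT, dif_neg hm, dif_neg hg]
    exact ih (fun k hk1 hk2 => H k (by omega) hk2)
  | case3 i hT =>
    intro _
    rw [pvScanC_stop T f i hT, pvScanC_stop T g i hT]

-- ===== mask characterisation (A side) =====

theorem pvMark_length (s e : Int) : ∀ (m : List Int), (pvMark m s e).length = m.length := by
  unfold pvMark
  generalize PySem.List.pyRange s (e + 1) = l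
  induction l with
  | nil => intro m; rfl
  | cons x xs ih => intro m; simp only [List.foldl_cons]; rw [ih]; simp

theorem getD_set_toNat (m : List Int) (n : Nat) (k : Int) (hk : 0 ≤ k) (v : Int)
    (hn : n < m.length) :
    (m.set n v).getD k.toNat 0 = if (n : Int) = k then v else m.getD k.toNat 0 := by
  rw [List.getD_eq_getElem?_getD, List.getD_eq_getElem?_getD, List.getElem?_set]
  by_cases h : (n : Int) = k
  · have h2 : n = k.toNat := by omega
    subst h2
    rw [if_pos rfl, if_pos hn, if_pos h]
    rfl
  · have h2 : ¬ n = k.toNat := by omega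
    rw [if_neg h2, if_neg h]

theorem pvMark_getD (s e k : Int) (hk : 0 ≤ k) :
    ∀ (m : List Int), 0 ≤ s → e < (m.length : Int) → (k : Int) < (m.length : Int) →
    (pvMark m s e).getD k.toNat 0 = if s ≤ k ∧ k ≤ e then 1 else m.getD k.toNat 0 := by
  unfold pvMark
  intro m hs he hkm
  induction hn : (e + 1 - s).toNat generalizing s m with
  | zero =>
    have hse : ¬ s ≤ e := by omega
    rw [show PySem.List.pyRange s (e+1) = [] by
      rw [PySem.List.pyRange_one]; have : (e + 1 - s).toNat = 0 := by omega
      simp [this]]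
    simp only [List.foldl_nil]
    have : ¬ (s ≤ k ∧ k ≤ e) := by omega
    simp [this]
  | succ n ih =>
    have hse : s < e + 1 := by omega
    rw [PySem.List.pyRange_one_cons hse]
    simp only [List.foldl_cons]
    have hslen : s.toNat < m.length := by omega
    rw [ih (s + 1) (m.set s.toNat 1) (by omega) (by simpa using he) (by simpa using hkm) (by omega)]
    rw [getD_set_toNat m s.toNat k hk 1 hslen]
    have hcast : ((s.toNat : Nat) : Int) = s := by omega
    rw [hcast]
    by_cases hA : s ≤ k ∧ k ≤ e
    · rw [if_pos hA]
      by_cases hB : s + 1 ≤ k ∧ k ≤ e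
      · rw [if_pos hB]
      · have hsk : s = k := by omega
        rw [if_neg hB, if_pos hsk]
    · have hB : ¬ (s + 1 ≤ k ∧ k ≤ e) := by omega
      have hsk : ¬ s = k := by omega
      rw [if_neg hA, if_neg hB, if_neg hsk]

theorem pvClamp_bounds (x T : Int) (hT : 0 ≤ T) : 0 ≤ pvClamp x 0 T ∧ pvClamp x 0 T ≤ T := by
  unfold pvClamp; omega

theorem pvBuildMask_fold_getD (T g : Int) (hT : 0 ≤ T) (k : Int) (hk : 0 ≤ k) (hkT : k ≤ T) :
    ∀ (l : List (Int × Int)) (m : List Int), m.length = (T + 1).toNat →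
      (l.foldl (fun m p => pvMark m (pvClamp (p.1 - g) 0 T) (pvClamp (p.2 + g) 0 T)) m).getD k.toNat 0
        = if l.any (fun p => decide (pvClamp (p.1 - g) 0 T ≤ k ∧ k ≤ pvClamp (p.2 + g) 0 T))
          then 1 else m.getD k.toNat 0 := by
  intro l
  induction l with
  | nil => intro m hm; simp
  | cons p ps ih =>
    intro m hm
    simp only [List.foldl_cons, List.any_cons]
    have hs := pvClamp_bounds (p.1 - g) T hT
    have he := pvClamp_bounds (p.2 + g) T hT
    rw [ih (pvMark m (pvClamp (p.1 - g) 0 T) (pvClamp (p.2 + g) 0 T)) (by rw [pvMark_length]; exact hm)]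
    rw [pvMark_getD _ _ k hk m hs.1 (by omega) (by omega)]
    by_cases hps : (ps.any fun p => decide (pvClamp (p.1 - g) 0 T ≤ k ∧ k ≤ pvClamp (p.2 + g) 0 T)) = true
    · rw [if_pos hps, if_pos (by rw [hps]; simp)]
    · rw [if_neg hps]
      by_cases hp : pvClamp (p.1 - g) 0 T ≤ k ∧ k ≤ pvClamp (p.2 + g) 0 T
      · rw [if_pos hp, if_pos (by simp [hp])]
      · have hO : ¬ ((decide (pvClamp (p.1 - g) 0 T ≤ k ∧ k ≤ pvClamp (p.2 + g) 0 T)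
            || ps.any fun p => decide (pvClamp (p.1 - g) 0 T ≤ k ∧ k ≤ pvClamp (p.2 + g) 0 T)) = true) := by
          simp only [Bool.or_eq_true, decide_eq_true_eq]
          rintro (h | h)
          · exact hp h
          · exact hps h
        rw [if_neg hp, if_neg hO]

theorem getD_replicate_zero (n : Nat) (k : Nat) : (List.replicate n (0 : Int)).getD k 0 = 0 := by
  rw [List.getD_eq_getElem?_getD]
  by_cases h : k < n
  · simp [List.getElem?_replicate, h]
  · rw [List.getElem?_eq_none (by simpa using h)]; rfl

theorem pvBuildMask_getD (T g : Int) (hT : 0 ≤ T) (l : List (Int × Int)) (k : Int)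
    (hk : 0 ≤ k) (hkT : k ≤ T) :
    (pvBuildMask T l g).getD k.toNat 0
      = if l.any (fun p => decide (pvClamp (p.1 - g) 0 T ≤ k ∧ k ≤ pvClamp (p.2 + g) 0 T))
        then 1 else 0 := by
  unfold pvBuildMask
  rw [pvBuildMask_fold_getD T g hT k hk hkT l _ (by simp)]
  rw [getD_replicate_zero]

-- ===== B's filtered list and coverage =====

def pvIvs (T g : Int) (l : List (Int × Int)) : List (Int × Int) :=
  (l.filter (fun p => decide (min (max (p.1 - g) 0) T ≤ min (max (p.2 + g) 0) T))).map
    (fun p => (min (max (p.1 - g) 0) T, min (max (p.2 + g) 0) T))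

theorem pvIvs_fold_aux (T g : Int) :
    ∀ (l : List (Int × Int)) (acc : List (Int × Int)),
      l.foldl (fun acc p =>
        let s2 := min (max (p.1 - g) 0) T
        let e2 := min (max (p.2 + g) 0) T
        if s2 ≤ e2 then acc ++ [(s2, e2)] else acc) acc = acc ++ pvIvs T g l := by
  have hbody : ∀ (acc : List (Int × Int)) (p : Int × Int),
      (let s2 := min (max (p.1 - g) 0) T
       let e2 := min (max (p.2 + g) 0) T
       if s2 ≤ e2 then acc ++ [(s2, e2)] else acc)
      = if min (max (p.1 - g) 0) T ≤ min (max (p.2 + g) 0) T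
        then acc ++ [(min (max (p.1 - g) 0) T, min (max (p.2 + g) 0) T)] else acc :=
    fun _ _ => rfl
  intro l
  induction l with
  | nil => intro acc; simp [pvIvs]
  | cons p ps ih =>
    intro acc
    rw [List.foldl_cons, hbody, ih]
    by_cases hc : min (max (p.1 - g) 0) T ≤ min (max (p.2 + g) 0) T
    · rw [if_pos hc]
      unfold pvIvs
      rw [List.filter_cons, if_pos (by simpa using hc)]
      simp
    · rw [if_neg hc]
      unfold pvIvs
      rw [List.filter_cons, if_neg (by simpa using hc)]

theorem pvIvs_eq_fold (T g : Int) (l : List (Int × Int)) :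
    l.foldl (fun acc p =>
      let s2 := min (max (p.1 - g) 0) T
      let e2 := min (max (p.2 + g) 0) T
      if s2 ≤ e2 then acc ++ [(s2, e2)] else acc) [] = pvIvs T g l := by
  rw [pvIvs_fold_aux]; rfl

theorem cov_pvIvs (T g : Int) (hT : 0 ≤ T) (l : List (Int × Int)) (k : Int) :
    pvCov (pvIvs T g l) k
      = l.any (fun p => decide (pvClamp (p.1 - g) 0 T ≤ k ∧ k ≤ pvClamp (p.2 + g) 0 T)) := by
  unfold pvCov pvIvs
  rw [List.any_map, List.any_filter]
  refine List.any_congr rfl ?_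
  intro p
  simp only [Function.comp]
  have h1 : pvClamp (p.1 - g) 0 T = min (max (p.1 - g) 0) T := by unfold pvClamp; omega
  have h2 : pvClamp (p.2 + g) 0 T = min (max (p.2 + g) 0) T := by unfold pvClamp; omega
  rw [h1, h2]
  by_cases hc : min (max (p.1 - g) 0) T ≤ k ∧ k ≤ min (max (p.2 + g) 0) T
  · have : min (max (p.1 - g) 0) T ≤ min (max (p.2 + g) 0) T := by omega
    simp [hc, this]
  · simp only [hc, decide_false, Bool.and_false]

theorem pvCov_perm (l₁ l₂ : List (Int × Int)) (h : l₁.Perm l₂) (k : Int) :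
    pvCov l₁ k = pvCov l₂ k := by
  unfold pvCov
  by_cases h1 : l₁.any (fun p => decide (p.1 ≤ k ∧ k ≤ p.2))
  · rw [h1]; symm
    rw [List.any_eq_true] at h1 ⊢
    obtain ⟨p, hp, hpk⟩ := h1
    exact ⟨p, h.mem_iff.mp hp, hpk⟩
  · simp only [Bool.not_eq_true] at h1
    rw [h1]; symm
    rw [List.any_eq_false] at h1 ⊢
    intro p hp; exact h1 p (h.mem_iff.mpr hp)

-- ===== sortedness of sorted2 (lexicographic) on first components =====

def pvLexLe (a b : Int × Int) : Prop := a.1 < b.1 ∨ (a.1 = b.1 ∧ a.2 ≤ b.2)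

theorem insertBy_lex_pairwise (x : Int × Int) (ys : List (Int × Int))
    (h : ys.Pairwise pvLexLe) :
    (PySem.List.insertBy
      (fun a b => decide (a.1 < b.1) || (!decide (b.1 < a.1) && decide (a.2 < b.2))) x ys).Pairwise pvLexLe := by
  induction ys with
  | nil => simp [PySem.List.insertBy]
  | cons y ys ih =>
    rw [PySem.List.insertBy]
    by_cases hb : (decide (x.1 < y.1) || (!decide (y.1 < x.1) && decide (x.2 < y.2))) = true
    · simp only [hb, if_pos]
      have hxy : pvLexLe x y := by
        simp only [Bool.or_eq_true, Bool.and_eq_true, Bool.not_eq_true', decide_eq_true_eq,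
          decide_eq_false_iff_not] at hb
        unfold pvLexLe; omega
      constructor
      · intro z hz
        rcases List.mem_cons.mp hz with hz | hz
        · exact hz ▸ hxy
        · have hyz : pvLexLe y z := (List.pairwise_cons.mp h).1 z hz
          unfold pvLexLe at *; omega
      · exact h
    · simp only [hb, if_neg, not_false_iff]
      have hyx : pvLexLe y x := by
        simp only [Bool.or_eq_true, Bool.and_eq_true, Bool.not_eq_true', decide_eq_true_eq,
          decide_eq_false_iff_not, not_or, not_and] at hb
        unfold pvLexLe; omega
      rw [List.pairwise_cons] at h
      constructor
      · intro z hz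
        rcases (PySem.List.mem_insertBy _ x z ys).mp hz with hz | hz
        · exact hz ▸ hyx
        · exact h.1 z hz
      · exact ih h.2

theorem sorted2_lex_pairwise (l : List (Int × Int)) :
    (PySem.List.sorted2 l (fun p => p.1) (fun p => p.2)).Pairwise pvLexLe := by
  unfold PySem.List.sorted2
  simp only [if_neg]
  suffices h : ∀ (acc : List (Int × Int)), acc.Pairwise pvLexLe →
      (l.foldl (fun acc x => PySem.List.insertBy
        (fun a b => decide (a.1 < b.1) || (!decide (b.1 < a.1) && decide (a.2 < b.2))) x acc) acc).Pairwise pvLexLe by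
    exact h [] (by simp)
  induction l with
  | nil => intro acc hacc; exact hacc
  | cons x xs ih =>
    intro acc hacc
    simp only [List.foldl_cons]
    exact ih _ (insertBy_lex_pairwise x acc hacc)

-- ===== the sweep (B) equals the reference scan =====

theorem pvSweep_eq_scanC (T : Int) :
    ∀ (l : List (Int × Int)), l.Pairwise (fun a b => a.1 ≤ b.1) →
      (∀ p ∈ l, 0 ≤ p.1 ∧ p.1 ≤ p.2 ∧ p.2 ≤ T) →
      ∀ (cur : Int) (neg : List (Int × Int)), 0 ≤ cur →
        (if (l.foldl pvStep (neg, cur)).2 ≤ T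
          then (l.foldl pvStep (neg, cur)).1 ++ [((l.foldl pvStep (neg, cur)).2, T)]
          else (l.foldl pvStep (neg, cur)).1)
          = neg ++ pvScanC T (pvCov l) cur := by
  intro l
  induction l with
  | nil =>
    intro _ _ cur neg hcur
    simp only [List.foldl_nil]
    have hcov : ∀ k, pvCov ([] : List (Int × Int)) k = false := fun k => rfl
    by_cases hc : cur ≤ T
    · rw [if_pos hc, pvScanC, dif_pos hc,
        dif_pos (show ¬ pvCov ([] : List (Int × Int)) cur = true by rw [hcov]; simp),
        pvFindC_top T _ cur hc (fun k _ _ => hcov k),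
        pvScanC_stop T _ (T + 1) (by omega)]
      norm_num
    · rw [if_neg hc, pvScanC_stop T _ cur hc]
      simp
  | cons p rest ih =>
    intro hpw hbnd cur neg hcur
    obtain ⟨s2, e2⟩ := p
    have hb := hbnd (s2, e2) (List.mem_cons_self ..)
    simp only at hb
    rw [List.pairwise_cons] at hpw
    have hstarts : ∀ q ∈ rest, s2 ≤ q.1 := fun q hq => hpw.1 q hq
    have hbr : ∀ q ∈ rest, 0 ≤ q.1 ∧ q.1 ≤ q.2 ∧ q.2 ≤ T :=
      fun q hq => hbnd q (List.mem_cons_of_mem _ hq)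
    have hcovF : ∀ k, pvCov ((s2, e2) :: rest) k
        = (decide (s2 ≤ k ∧ k ≤ e2) || pvCov rest k) := by
      intro k; unfold pvCov; simp
    rw [List.foldl_cons]
    by_cases hgt : cur < s2
    · -- emit a gap (cur, s2-1), jump to e2+1
      have hstep : pvStep (neg, cur) (s2, e2) = (neg ++ [(cur, s2 - 1)], e2 + 1) := by
        unfold pvStep
        simp only [hgt, if_pos]
        congr 1
        omega
      rw [hstep, ih hpw.2 hbr (e2 + 1) (neg ++ [(cur, s2 - 1)]) (by omega)]
      have hlow : ∀ k, k < s2 → pvCov ((s2, e2) :: rest) k = false := by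
        intro k hk
        rw [hcovF]
        have h1 : ¬ (s2 ≤ k ∧ k ≤ e2) := by omega
        have h2 : pvCov rest k = false := by
          unfold pvCov
          rw [List.any_eq_false]
          intro q hq
          have := hstarts q hq
          simp; omega
        simp [h1, h2]
      have hscan : pvScanC T (pvCov ((s2, e2) :: rest)) cur
          = (cur, s2 - 1) :: pvScanC T (pvCov rest) (e2 + 1) := by
        have hcT : cur ≤ T := by omega
        have hfc : pvFindC T (pvCov ((s2, e2) :: rest)) cur = s2 := by
          apply pvFindC_eq T _ cur s2 (by omega) (by omega)
          · intro k hk1 hk2; exact hlow k hk2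
          · rw [hcovF]
            have : s2 ≤ s2 ∧ s2 ≤ e2 := ⟨le_refl _, by omega⟩
            simp [this]
        rw [pvScanC, dif_pos hcT,
          dif_pos (show ¬ pvCov ((s2, e2) :: rest) cur = true by rw [hlow cur hgt]; simp),
          hfc]
        congr 1
        rw [pvScanC_skip T _ s2 (e2 + 1) (by omega)
          (fun k hk1 hk2 => by
            rw [hcovF]
            have : s2 ≤ k ∧ k ≤ e2 := by omega
            simp [this])]
        apply pvScanC_congr
        intro k hk1 hkT
        rw [hcovF]
        have : ¬ (s2 ≤ k ∧ k ≤ e2) := by omega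
        simp [this]
      rw [hscan]
      simp
    · -- s2 ≤ cur: no gap emitted
      have hstep : pvStep (neg, cur) (s2, e2) = (neg, max cur (e2 + 1)) := by
        unfold pvStep; simp only [hgt, if_neg, not_false_iff]
      rw [hstep, ih hpw.2 hbr (max cur (e2 + 1)) neg (by omega)]
      congr 1
      by_cases hle : e2 < cur
      · have hmax : max cur (e2 + 1) = cur := by omega
        rw [hmax]
        apply pvScanC_congr
        intro k hk1 hkT
        rw [hcovF]
        have : ¬ (s2 ≤ k ∧ k ≤ e2) := by omega
        simp [this]
      · have hmax : max cur (e2 + 1) = e2 + 1 := by omega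
        rw [hmax]
        rw [pvScanC_skip T (pvCov ((s2, e2) :: rest)) cur (e2 + 1) (by omega)
          (fun k hk1 hk2 => by
            rw [hcovF]
            have : s2 ≤ k ∧ k ≤ e2 := by omega
            simp [this])]
        apply pvScanC_congr
        intro k hk1 hkT
        rw [hcovF]
        have : ¬ (s2 ≤ k ∧ k ≤ e2) := by omega
        simp [this]

-- ===== assembling =====

theorem alt_eq (T : Int) (l : List (Int × Int)) (g : Int) :
    gen_non_overlap_intervals_alt T l g =
      (if ((PySem.List.sorted2 (pvIvs T g l) (fun p => p.1) (fun p => p.2)).foldl pvStep ([], 0)).2 ≤ T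
        then ((PySem.List.sorted2 (pvIvs T g l) (fun p => p.1) (fun p => p.2)).foldl pvStep ([], 0)).1
          ++ [(((PySem.List.sorted2 (pvIvs T g l) (fun p => p.1) (fun p => p.2)).foldl pvStep ([], 0)).2, T)]
        else ((PySem.List.sorted2 (pvIvs T g l) (fun p => p.1) (fun p => p.2)).foldl pvStep ([], 0)).1) := by
  unfold gen_non_overlap_intervals_alt
  rw [pvIvs_eq_fold]

theorem gen_non_overlap_intervals_spec : Claim_equal_gen_non_overlap_intervals := by
  intro T l g _ hPre
  unfold Spec_gen_non_overlap_intervals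
  by_cases hT : 0 ≤ T
  · have hperm := PySem.List.sorted2_perm (pvIvs T g l) (fun p => p.1) (fun p => p.2) false
    set svs := PySem.List.sorted2 (pvIvs T g l) (fun p => p.1) (fun p => p.2) with hsvs
    have hpw : svs.Pairwise (fun a b : Int × Int => a.1 ≤ b.1) :=
      (sorted2_lex_pairwise (pvIvs T g l)).imp (fun h => by unfold pvLexLe at h; omega)
    have hmem : ∀ p ∈ svs, 0 ≤ p.1 ∧ p.1 ≤ p.2 ∧ p.2 ≤ T := by
      intro p hp
      have hpi : p ∈ pvIvs T g l := hperm.mem_iff.mp hp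
      unfold pvIvs at hpi
      obtain ⟨q, hq, rfl⟩ := List.mem_map.mp hpi
      have hqf := (List.mem_filter.mp hq).2
      simp only [decide_eq_true_eq] at hqf
      refine ⟨by omega, by simpa using hqf, by omega⟩
    have hcov : ∀ k : Int, 0 ≤ k → k ≤ T →
        (((pvBuildMask T l g).getD k.toNat 0) == 0) = ! pvCov svs k := by
      intro k h1 h2
      rw [pvBuildMask_getD T g hT l k h1 h2, pvCov_perm svs (pvIvs T g l) hperm k,
        cov_pvIvs T g hT l k]
      cases hany : l.any (fun p => decide (pvClamp (p.1 - g) 0 T ≤ k ∧ k ≤ pvClamp (p.2 + g) 0 T)) <;>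
        simp [hany]
    have hA := pvScan_eq_scanC (pvBuildMask T l g) T (pvCov svs) hcov 0 le_rfl
    have hB := pvSweep_eq_scanC T svs hpw hmem 0 [] le_rfl
    unfold gen_non_overlap_intervals
    rw [alt_eq, ← hsvs, hB, hA]
    rfl
  · have hl : l = [] := hPre.resolve_left hT
    subst hl
    unfold gen_non_overlap_intervals
    rw [pvScan, dif_neg hT]
    rw [alt_eq]
    have h0 : pvIvs T g ([] : List (Int × Int)) = [] := rfl
    rw [h0]
    have h1 : PySem.List.sorted2 ([] : List (Int × Int)) (fun p => p.1) (fun p => p.2) = [] := rfl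
    rw [h1]
    simp only [List.foldl_nil]
    rw [if_neg hT]
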